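-- pv_equiv track=rewrite | github.com/gxdxx-new/TIL | Algorithm/Programmers/72410.py | solution
-- ===== SOURCE A (Python) =====
-- def solution(new_id):
--
--     #1
--     step1 = new_id.lower()
--
--     #2
--     step2 = ''
--     possibleLetters = ['a','b','c','d','e','f','g','h','i','j','k','l','m','n','o','p','q','r','s','t','u','v','w','x','y','z','0','1','2','3','4','5','6','7','8','9','-','_','.']
--     for i in range(len(new_id)):
--         for j in range(len(possibleLetters)):
--             if(step1[i] == possibleLetters[j]):
--                 step2 += step1[i]
--                 break
--
--     #3
--     step3 = step2
--     while '..' in step3: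
--         step3 = step3.replace('..', '.')
--
--     #4
--     step4 = step3
--     if(step4[0] == '.'):
--         step4 = step4.replace('.', '', 1)
--     if(step4 != ''):
--         if(step4[-1] == '.'):
--             step4 = step4[:-1]
--     #5
--     step5 = step4
--     if(step5 == ''):
--         step5 = 'a'
--     #6
--     step6 = step5
--     if(len(step6) >= 16):
--         step6 = step6[:15]
--     if(step6[-1] == '.'):
--         step6 = step6[:-1]
--
--     #7
--     step7 = step6
--     while(len(step7) <= 2):
--         step7 = step7 + step7[-1]
--
--     answer = step7
--     return answer
-- ===== SOURCE B (Python) =====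
-- def solution(new_id):
--     allowed = set('abcdefghijklmnopqrstuvwxyz0123456789-_.')
--     buf = []
--     for c in new_id.lower():
--         if c in allowed and not (c == '.' and buf and buf[-1] == '.'):
--             buf.append(c)
--     s = ''.join(buf).strip('.')
--     if not s:
--         s = 'a'
--     s = s[:15].rstrip('.')
--     return s + s[-1] * (3 - len(s))
-- ===== Notes on version B (the rewrite author's own statement) =====
-- stated objective: faster
-- what changed: A's nested 39-way character scan (step2) and its repeated whole-string dot-pair-collapsing replace passes (step3) are merged into one left-to-right stateful pass that filters and collapses dots in a single traversal; the one-dot strips become strip/rstrip calls and the padding while-loop becomes arithmetic string repetition.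
import Mathlib
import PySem

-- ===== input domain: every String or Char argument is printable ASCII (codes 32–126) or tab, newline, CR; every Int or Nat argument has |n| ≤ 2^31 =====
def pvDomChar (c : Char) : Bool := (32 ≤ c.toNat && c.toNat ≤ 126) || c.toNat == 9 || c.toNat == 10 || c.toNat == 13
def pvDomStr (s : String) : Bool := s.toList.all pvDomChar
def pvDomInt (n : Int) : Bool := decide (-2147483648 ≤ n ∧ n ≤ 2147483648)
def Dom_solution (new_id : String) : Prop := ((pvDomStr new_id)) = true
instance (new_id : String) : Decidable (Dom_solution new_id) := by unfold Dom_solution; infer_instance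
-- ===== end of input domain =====

-- B merges A's 39-way inner character scan and the repeated '..'-replace passes into one
-- left-to-right filter-and-collapse pass and uses strip/rstrip/arithmetic padding for steps 4-7.

-- ===== PORT A =====

-- possibleLetters from A, in A's order
def pvLetters : List Char :=
  ['a','b','c','d','e','f','g','h','i','j','k','l','m','n','o','p','q','r','s','t',
   'u','v','w','x','y','z','0','1','2','3','4','5','6','7','8','9','-','_','.']

-- A's inner 'for j … break' loop: scan possibleLetters in order, stop at the first match
def pvInner (c : Char) : List Char → Bool
  | [] => false
  | p :: ps => if c == p then true else pvInner c ps

-- one pass of A's dot-pair replacement: the left-to-right non-overlapping replace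
-- (used only to prove that A's while loop terminates and to reason about it)
def pvCollapse1 : List Char → List Char
  | [] => []
  | [c] => [c]
  | c :: d :: t => if c = '.' ∧ d = '.' then '.' :: pvCollapse1 t else c :: pvCollapse1 (d :: t)

theorem pvGo_spec (fuel : Nat) (l acc : List Char) (h : l.length ≤ fuel) :
    PySem.Chars.replace.go ['.', '.'] ['.'] fuel l acc = acc.reverse ++ pvCollapse1 l := by
  induction fuel generalizing l acc with
  | zero =>
    have : l = [] := List.eq_nil_of_length_eq_zero (Nat.le_zero.mp h)
    subst this
    rw [PySem.Chars.replace.go.eq_def]; simp [pvCollapse1]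
  | succ n ih =>
    match l with
    | [] => rw [PySem.Chars.replace.go.eq_def]; simp [pvCollapse1]
    | [c] =>
      rw [PySem.Chars.replace.go.eq_def]
      have hpre : (['.', '.'] : List Char).isPrefixOf [c] = false := by
        simp [List.isPrefixOf]
      simp only [hpre]
      rw [if_neg (by simp)]
      rw [ih [] (c :: acc) (by simp)]
      simp [pvCollapse1]
    | c :: d :: t =>
      rw [PySem.Chars.replace.go.eq_def]
      by_cases hcd : c = '.' ∧ d = '.'
      · obtain ⟨rfl, rfl⟩ := hcd
        have hpre : (['.', '.'] : List Char).isPrefixOf ('.' :: '.' :: t) = true := by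
          simp [List.isPrefixOf]
        simp only [hpre]
        rw [if_pos trivial]
        show PySem.Chars.replace.go ['.', '.'] ['.'] n t ('.' :: acc) = _
        rw [ih t (('.' : Char) :: acc) (by simp at h ⊢; omega)]
        simp [pvCollapse1]
      · have hpre : (['.', '.'] : List Char).isPrefixOf (c :: d :: t) = false := by
          simp [List.isPrefixOf]
          intro hc hd; exact hcd ⟨hc.symm, hd.symm⟩
        simp only [hpre]
        rw [if_neg (by simp)]
        rw [ih (d :: t) (c :: acc) (by simp at h ⊢; omega)]
        simp [pvCollapse1, hcd]

theorem pvCollapse1_length_le : ∀ l : List Char, (pvCollapse1 l).length ≤ l.length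
  | [] => by simp [pvCollapse1]
  | [c] => by simp [pvCollapse1]
  | c :: d :: t => by
    by_cases h : c = '.' ∧ d = '.'
    · have := pvCollapse1_length_le t
      simp [pvCollapse1, h]; omega
    · have := pvCollapse1_length_le (d :: t)
      simp [pvCollapse1, h] at this ⊢; omega

theorem pvCollapse1_length_lt : ∀ l : List Char, ['.', '.'] <:+: l → (pvCollapse1 l).length < l.length
  | [], h => by simp at h
  | [c], h => by have := h.length_le; simp at this
  | c :: d :: t, h => by
    by_cases hcd : c = '.' ∧ d = '.'
    · have := pvCollapse1_length_le t
      simp [pvCollapse1, hcd]; omega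
    · have ht : ['.', '.'] <:+: d :: t := by
        rcases List.infix_cons_iff.mp h with hp | hi
        · exfalso
          rcases hp with ⟨r, hr⟩
          simp at hr
          exact hcd ⟨hr.1.symm, hr.2.1.symm⟩
        · exact hi
      have := pvCollapse1_length_lt (d :: t) ht
      simp [pvCollapse1, hcd] at this ⊢; omega

theorem pvReplace_eq (s : List Char) :
    PySem.Chars.replace s ['.', '.'] ['.'] = pvCollapse1 s := by
  unfold PySem.Chars.replace
  simp [pvGo_spec s.length s [] (le_refl _)]

theorem pvReplace_dd_length (s : List Char)
    (h : PySem.Chars.isIn ['.', '.'] s = true) :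
    (PySem.Chars.replace s ['.', '.'] ['.']).length < s.length := by
  rw [pvReplace_eq]
  exact pvCollapse1_length_lt s ((PySem.Chars.isIn_iff_infix _ _).mp h)

-- A step 3: the while-replace collapse loop
def pvStep3Loop (s : List Char) : List Char :=
  if h : PySem.Chars.isIn ['.', '.'] s = true then
    pvStep3Loop (PySem.Chars.replace s ['.', '.'] ['.'])
  else s
termination_by s.length
decreasing_by exact pvReplace_dd_length s h

-- step4.replace with count 1: remove the first dot (PySem.Chars.replace has no count argument; exact)
def pvRemoveFirstDot : List Char → List Char
  | [] => []
  | c :: t => if c = '.' then t else c :: pvRemoveFirstDot t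

-- A step 7: while len(s) <= 2: s = s + s[-1]
def pvStep7Loop (s : List Char) : List Char :=
  if s.length ≤ 2 then
    match PySem.List.pyGet? s (-1) with
    | some c => pvStep7Loop (s ++ [c])
    | none => s    -- s = []: Python would raise IndexError; step6 is never empty
  else s
termination_by 3 - s.length
decreasing_by simp; omega

def solution (new_id : String) : String :=
  let step1 := PySem.Chars.lower new_id.toList
  let step2 := (PySem.List.pyRange 0 (PySem.Str.len new_id)).foldl
    (fun acc i =>
      match PySem.List.pyGet? step1 i with
      | some ci => if pvInner ci pvLetters then acc ++ [ci] else acc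
      | none => acc)    -- i is always in range
    []
  let step3 := pvStep3Loop step2
  match PySem.List.pyGet? step3 0 with
  | none => ""    -- step3 = '': Python raises IndexError at step4[0]; excluded by Pre_
  | some c0 =>
    let step4a := if c0 = '.' then pvRemoveFirstDot step3 else step3
    let step4 :=
      if step4a ≠ [] then
        match PySem.List.pyGet? step4a (-1) with
        | some cl => if cl = '.' then PySem.List.slice step4a none (some (-1)) else step4a
        | none => step4a
      else step4a
    let step5 := if step4 = [] then ['a'] else step4
    let step6a := if 16 ≤ PySem.List.len step5 then PySem.List.slice step5 none (some 15) else step5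
    let step6 :=
      match PySem.List.pyGet? step6a (-1) with
      | some cl => if cl = '.' then PySem.List.slice step6a none (some (-1)) else step6a
      | none => step6a    -- step6a is never empty
    String.ofList (pvStep7Loop step6)

-- ===== PORT B =====

def pvAllowedSet : PySem.Set Char :=
  PySem.Set.ofList "abcdefghijklmnopqrstuvwxyz0123456789-_.".toList

-- Python rstrip with a dot argument (PySem has no chars-argument rstrip; exact)
def pvRstripDot (s : List Char) : List Char :=
  (s.reverse.dropWhile (fun c => c == '.')).reverse

def solution_alt (new_id : String) : String :=
  let buf := (PySem.Str.lower new_id).toList.foldl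
    (fun buf c =>
      if PySem.Set.contains pvAllowedSet c && !(c == '.' && buf.getLast? == some '.') then
        buf ++ [c]
      else buf)
    []
  let s0 := PySem.Chars.stripChars buf ['.']
  let s1 := if s0 = [] then ['a'] else s0
  let s2 := pvRstripDot (PySem.List.slice s1 none (some 15))
  match PySem.List.pyGet? s2 (-1) with
  | some c => String.ofList (s2 ++ List.replicate (3 - (PySem.List.len s2)).toNat c)
  | none => String.ofList s2    -- s2 is never empty

-- ===== PRECONDITION & SPEC =====

-- Pre_ excludes exactly the inputs whose lowercase form keeps no allowed character:
-- there A raises IndexError at step4[0] (step3 is empty).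
def Pre_solution (new_id : String) : Prop :=
  (PySem.Chars.lower new_id.toList).filter (fun c => pvLetters.contains c) ≠ []
instance (new_id : String) : Decidable (Pre_solution new_id) := by unfold Pre_solution; infer_instance
def pvWitness_solution : String := "a.B"

def Spec_solution (new_id : String) (out : String) : Prop := out = solution_alt new_id
instance (new_id : String) (out : String) : Decidable (Spec_solution new_id out) := by unfold Spec_solution; infer_instance

-- ===== CLAIM (what is proved, stated in full; the proofs are below) =====
def Claim_equal_solution : Prop := ∀ (new_id : String), Dom_solution new_id → Pre_solution new_id → Spec_solution new_id (solution new_id)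
-- ===== LEMMAS AND PROOFS =====

-- the one-pass filter-and-collapse state machine (b = 'last emitted char is a dot')
def pvGo2 : Bool → List Char → List Char
  | _, [] => []
  | b, c :: t =>
    if c = '.' then (if b then pvGo2 true t else '.' :: pvGo2 true t)
    else c :: pvGo2 false t

-- adjacent emitted characters are never both dots
def pvR (a b : Char) : Prop := ¬(a = '.' ∧ b = '.')

-- the dot predicate
def pvPd (c : Char) : Bool := c == '.'

-- strip one trailing dot (the common shape of A's step4/step6 tails and of rstrip('.'))
def pvTs (m : List Char) : List Char :=
  if m.getLast? = some '.' then m.dropLast else m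

theorem pvInner_eq (ls : List Char) (c : Char) : pvInner c ls = ls.contains c := by
  induction ls with
  | nil => simp [pvInner]
  | cons p ps ih =>
    by_cases h : c = p <;> simp [pvInner, ih, h, List.contains_cons]

theorem pvGet0 (m : List Char) : PySem.List.pyGet? m 0 = m.head? := by
  cases m <;> simp [PySem.List.pyGet?, PySem.List.pyIdx?]

theorem pvGetNeg1 (m : List Char) : PySem.List.pyGet? m (-1) = m.getLast? := by
  cases m with
  | nil => simp [PySem.List.pyGet?, PySem.List.pyIdx?]
  | cons a t => simp [PySem.List.pyGet?, PySem.List.pyIdx?, List.getLast?_eq_getElem?]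

theorem pvSliceNeg1 (m : List Char) :
    PySem.List.slice m none (some (-1)) = m.dropLast := by
  cases m with
  | nil => simp [PySem.List.slice, PySem.List.clampIdx]
  | cons a t =>
    have h1 : PySem.List.clampIdx (a :: t).length (-1) = t.length := by
      simp only [PySem.List.clampIdx]
      rw [if_pos (by omega), if_neg (by simp only [List.length_cons]; omega)]
      simp
    simp only [PySem.List.slice, h1]
    rw [List.dropLast_eq_take]
    simp

theorem pvSlice15 (m : List Char) :
    PySem.List.slice m none (some 15) = m.take 15 := by
  simp [PySem.List.slice, PySem.List.clampIdx]

-- ---- A's filter loop is the membership filter ----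

theorem pvStep2_eq (xs : List Char) :
    (PySem.List.pyRange 0 (xs.length : Int)).foldl
      (fun acc i =>
        match PySem.List.pyGet? xs i with
        | some ci => if pvInner ci pvLetters then acc ++ [ci] else acc
        | none => acc) []
    = xs.filter (fun c => pvLetters.contains c) := by
  have hcong : ∀ (acc : List Char), ∀ i ∈ PySem.List.pyRange 0 (xs.length : Int),
      (match PySem.List.pyGet? xs i with
       | some ci => if pvInner ci pvLetters then acc ++ [ci] else acc
       | none => acc)
      = (fun acc x => if pvLetters.contains x then acc ++ [x] else acc) acc
          (PySem.List.pyGetD xs i 'a') := by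
    intro acc i hi
    rw [PySem.List.mem_pyRange_iff_of_pos (by norm_num)] at hi
    obtain ⟨h0, hlt, -⟩ := hi
    have hn : i = ((i.toNat : Nat) : Int) := by omega
    have hlt' : i.toNat < xs.length := by omega
    rw [hn, PySem.List.pyGet?_natCast, PySem.List.pyGetD_natCast]
    rw [List.getElem?_eq_getElem hlt']
    simp [pvInner_eq, List.getElem?_eq_getElem hlt']
  rw [PySem.List.foldl_congr_mem _ _ _ _ hcong]
  have hlen : (xs.length : Int) = PySem.List.len xs := by simp [PySem.List.len]
  rw [hlen]
  rw [PySem.List.foldl_pyRange_pyGetD xs 'a'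
    (fun acc x => if pvLetters.contains x then acc ++ [x] else acc) [] (by norm_num)]
  simp only [Int.toNat_zero, List.drop_zero]
  have := PySem.List.foldl_append_if (fun c => pvLetters.contains c) (id : Char → Char) xs []
  simpa using this

-- ---- B's buffer loop is the one-pass machine on the filtered string ----

theorem pvAllowed_eq : pvAllowedSet = pvLetters := by decide

theorem pvFold_go2 (l buf : List Char) :
    l.foldl
      (fun buf c =>
        if PySem.Set.contains pvAllowedSet c && !(c == '.' && buf.getLast? == some '.') then
          buf ++ [c]
        else buf) buf
    = buf ++ pvGo2 (buf.getLast? == some '.') (l.filter (fun c => pvLetters.contains c)) := by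
  have hset : ∀ c, PySem.Set.contains pvAllowedSet c = pvLetters.contains c := by
    intro c; rw [pvAllowed_eq]; rfl
  simp only [hset]
  induction l generalizing buf with
  | nil => simp [pvGo2]
  | cons c t ih =>
    simp only [List.foldl_cons, List.filter_cons]
    by_cases hp : c ∈ pvLetters
    · by_cases hc : c = '.'
      · subst hc
        by_cases hb : buf.getLast? = some '.'
        · rw [if_neg (by simp [hb])]
          rw [ih buf]
          simp [hp, hb, pvGo2]
        · rw [if_pos (by simp [hp, hb])]
          rw [ih (buf ++ ['.'])]
          simp [hp, hb, pvGo2, List.getLast?_concat]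
      · rw [if_pos (by simp [hp, hc])]
        rw [ih (buf ++ [c])]
        simp [hp, hc, pvGo2, List.getLast?_concat]
        rw [show (c == '.') = false by simp [hc]]
    · rw [if_neg (by simp [hp])]
      rw [ih buf]
      simp [hp]

-- ---- A's while-replace loop is the one-pass machine ----

theorem pvGo2_collapse1 : ∀ (l : List Char) (b : Bool), pvGo2 b (pvCollapse1 l) = pvGo2 b l
  | [], _ => rfl
  | [c], _ => rfl
  | c :: d :: t, b => by
    by_cases hcd : c = '.' ∧ d = '.'
    · obtain ⟨rfl, rfl⟩ := hcd
      have h1 := pvGo2_collapse1 t true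
      cases b <;> simp [pvCollapse1, pvGo2, h1]
    · have h2 := pvGo2_collapse1 (d :: t) true
      have h3 := pvGo2_collapse1 (d :: t) false
      by_cases hc : c = '.'
      · subst hc
        have hd : ¬ d = '.' := fun h => hcd ⟨rfl, h⟩
        cases b <;> simp [pvCollapse1, pvGo2, hcd, hd, h2, h3]
      · cases b <;> simp [pvCollapse1, pvGo2, hcd, hc, h2, h3]

theorem pvGo2_true_eq_false (t : List Char) (h : ¬(['.', '.'] <:+: ('.' :: t))) :
    pvGo2 true t = pvGo2 false t := by
  cases t with
  | nil => rfl
  | cons d r =>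
    by_cases hd : d = '.'
    · subst hd; exact absurd ⟨[], r, rfl⟩ h
    · simp [pvGo2, hd]

theorem pvGo2_noDD : ∀ l : List Char, ¬(['.', '.'] <:+: l) → pvGo2 false l = l
  | [], _ => rfl
  | c :: t, h => by
    have ht : ¬(['.', '.'] <:+: t) := fun hi => h (List.infix_cons_iff.mpr (Or.inr hi))
    by_cases hc : c = '.'
    · subst hc
      have h1 : pvGo2 false ('.' :: t) = '.' :: pvGo2 true t := by simp [pvGo2]
      rw [h1, pvGo2_true_eq_false t h, pvGo2_noDD t ht]
    · have h1 : pvGo2 false (c :: t) = c :: pvGo2 false t := by simp [pvGo2, hc]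
      rw [h1, pvGo2_noDD t ht]

theorem pvStep3Loop_eq (s : List Char) : pvStep3Loop s = pvGo2 false s := by
  rw [pvStep3Loop]
  by_cases h : PySem.Chars.isIn ['.', '.'] s = true
  · rw [dif_pos h, pvReplace_eq, pvStep3Loop_eq (pvCollapse1 s)]
    exact pvGo2_collapse1 s false
  · rw [dif_neg h]
    exact (pvGo2_noDD s ((PySem.Chars.isIn_eq_false_iff _ _).mp (Bool.not_eq_true _ ▸ h))).symm
termination_by s.length
decreasing_by
  exact pvCollapse1_length_lt s ((PySem.Chars.isIn_iff_infix _ _).mp h)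

-- ---- the machine's output has no adjacent dots ----

theorem pvChain (t : List Char) :
    List.IsChain pvR ('.' :: pvGo2 true t) ∧
      ∀ c : Char, c ≠ '.' → List.IsChain pvR (c :: pvGo2 false t) := by
  induction t with
  | nil => constructor <;> simp [pvGo2]
  | cons a r ih =>
    constructor
    · by_cases ha : a = '.'
      · subst ha; simpa [pvGo2] using ih.1
      · have h1 : pvGo2 true (a :: r) = a :: pvGo2 false r := by simp [pvGo2, ha]
        rw [h1, List.isChain_cons_cons]
        exact ⟨fun hx => ha hx.2, ih.2 a ha⟩
    · intro c hc
      by_cases ha : a = '.'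
      · subst ha
        have h1 : pvGo2 false ('.' :: r) = '.' :: pvGo2 true r := by simp [pvGo2]
        rw [h1, List.isChain_cons_cons]
        exact ⟨fun hx => hc hx.1, ih.1⟩
      · have h1 : pvGo2 false (a :: r) = a :: pvGo2 false r := by simp [pvGo2, ha]
        rw [h1, List.isChain_cons_cons]
        exact ⟨fun hx => hc hx.1, ih.2 a ha⟩

theorem pvChain_go2_false (l : List Char) : List.IsChain pvR (pvGo2 false l) :=
  ((pvChain l).2 'a' (by decide)).tail

theorem pvGo2_false_ne_nil (l : List Char) (h : l ≠ []) : pvGo2 false l ≠ [] := by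
  cases l with
  | nil => exact absurd rfl h
  | cons c t => by_cases hc : c = '.' <;> simp [pvGo2, hc]

-- ---- dropWhile / strip on dot-free-pair strings ----

theorem pvDropWhile_chain (m : List Char) (h : List.IsChain pvR m) :
    m.dropWhile pvPd = if m.head? = some '.' then m.tail else m := by
  cases m with
  | nil => simp
  | cons c t =>
    by_cases hc : c = '.'
    · subst hc
      rw [if_pos (by simp)]
      rw [List.dropWhile_cons, if_pos (by simp [pvPd])]
      cases t with
      | nil => simp
      | cons d r =>
        have hd : ¬ d = '.' := fun hd => (List.isChain_cons_cons.mp h).1 ⟨rfl, hd⟩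
        rw [List.dropWhile_cons, if_neg (by simp [pvPd, hd])]
        rfl
    · rw [List.dropWhile_cons, if_neg (by simp [pvPd, hc]), if_neg (by simp [hc])]

theorem pvChain_reverse (m : List Char) (h : List.IsChain pvR m) :
    List.IsChain pvR m.reverse := by
  rw [List.isChain_reverse]
  exact h.imp (by intro a b hab hx; exact hab ⟨hx.2, hx.1⟩)

theorem pvRevTailRev (m : List Char) (a : Char) (as : List Char) (h : m.reverse = a :: as) :
    as.reverse = m.dropLast := by
  have hm : m = as.reverse ++ [a] := by
    rw [← List.reverse_reverse m, h]; simp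
  rw [hm, List.dropLast_concat]

theorem pvRstrip_chain (m : List Char) (h : List.IsChain pvR m) :
    (m.reverse.dropWhile pvPd).reverse = pvTs m := by
  rw [pvDropWhile_chain m.reverse (pvChain_reverse m h)]
  rw [List.head?_reverse]
  unfold pvTs
  by_cases hl : m.getLast? = some '.'
  · rw [if_pos hl, if_pos hl]
    cases hrev : m.reverse with
    | nil =>
      have : m = [] := by rw [← List.reverse_reverse m, hrev]; rfl
      simp [this]
    | cons a as => simp [hrev, pvRevTailRev m a as hrev]
  · rw [if_neg hl, if_neg hl, List.reverse_reverse]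

theorem pvTs_chain (m : List Char) (h : List.IsChain pvR m) : List.IsChain pvR (pvTs m) := by
  unfold pvTs
  split
  · rw [List.dropLast_eq_take]; exact h.take _
  · exact h

theorem pvTs_head (m : List Char) (c : Char) (hh : m.head? = some c) (hc : c ≠ '.') :
    (pvTs m).head? = some c := by
  unfold pvTs
  split
  · rename_i hl
    cases m with
    | nil => simp at hh
    | cons a t =>
      cases t with
      | nil =>
        simp at hh hl
        exact absurd (hh ▸ hl) hc
      | cons b r =>
        simp only [List.head?_cons, Option.some.injEq] at hh
        subst hh
        simp [List.dropLast]
  · exact hh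

theorem pvHead_dropWhile (m : List Char) (c : Char)
    (h : (m.dropWhile pvPd).head? = some c) : c ≠ '.' := by
  have := List.head?_dropWhile_not pvPd m
  rw [h] at this
  simp only [pvPd] at this
  intro hc
  subst hc
  simp at this

-- ---- A's steps 4-6 equal B's strip/take/rstrip ----

theorem pvStep4_eq (m : List Char) (h : List.IsChain pvR m) (hne : m ≠ []) (c0 : Char)
    (hc0 : m.head? = some c0) :
    (if (if c0 = '.' then pvRemoveFirstDot m else m) ≠ [] then
        match PySem.List.pyGet? (if c0 = '.' then pvRemoveFirstDot m else m) (-1) with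
        | some cl => if cl = '.' then
            PySem.List.slice (if c0 = '.' then pvRemoveFirstDot m else m) none (some (-1))
          else (if c0 = '.' then pvRemoveFirstDot m else m)
        | none => (if c0 = '.' then pvRemoveFirstDot m else m)
      else (if c0 = '.' then pvRemoveFirstDot m else m))
    = PySem.Chars.stripChars m ['.'] := by
  have hp : (fun c => (['.'] : List Char).contains c) = pvPd := by
    funext c; by_cases h : c = '.' <;> simp [pvPd, h]
  have hstep4a : (if c0 = '.' then pvRemoveFirstDot m else m) = m.dropWhile pvPd := by
    by_cases hc : c0 = '.'
    · subst hc
      cases m with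
      | nil => simp at hc0
      | cons a t =>
        simp only [List.head?_cons, Option.some.injEq] at hc0
        subst hc0
        rw [if_pos rfl, pvDropWhile_chain _ h, if_pos (by simp)]
        simp [pvRemoveFirstDot]
    · rw [if_neg hc, pvDropWhile_chain _ h, if_neg (by rw [hc0]; exact fun hx => hc (Option.some.inj hx))]
  rw [hstep4a]
  unfold PySem.Chars.stripChars
  rw [hp]
  have hchain1 : List.IsChain pvR (m.dropWhile pvPd) := by
    rw [pvDropWhile_chain _ h]
    split
    · exact h.tail
    · exact h
  rw [pvRstrip_chain _ hchain1]
  by_cases hnil : m.dropWhile pvPd = []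
  · simp [hnil, pvTs]
  · rw [if_pos hnil, pvGetNeg1]
    obtain ⟨cl, hcl⟩ : ∃ cl, (m.dropWhile pvPd).getLast? = some cl :=
      Option.ne_none_iff_exists'.mp (by simp [hnil])
    rw [hcl]
    show (if cl = '.' then PySem.List.slice (m.dropWhile pvPd) none (some (-1)) else m.dropWhile pvPd) = _
    unfold pvTs
    by_cases hdot : cl = '.'
    · subst hdot
      rw [if_pos rfl, if_pos hcl, pvSliceNeg1]
    · rw [if_neg hdot, if_neg (by rw [hcl]; exact fun hx => hdot (Option.some.inj hx))]

-- ---- A's step 7 equals arithmetic padding ----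

theorem pvStep7_eq (s : List Char) (c : Char) (h : s.getLast? = some c) :
    pvStep7Loop s = s ++ List.replicate (3 - s.length) c := by
  have hne : s ≠ [] := by intro hx; rw [hx] at h; simp at h
  have hlen : 1 ≤ s.length := List.length_pos_iff.mpr hne
  rw [pvStep7Loop]
  by_cases hl : s.length ≤ 2
  · rw [if_pos hl, pvGetNeg1, h]
    show pvStep7Loop (s ++ [c]) = _
    rw [pvStep7_eq (s ++ [c]) c List.getLast?_concat]
    rw [List.append_assoc]
    congr 1
    have h3 : 3 - s.length = (3 - (s.length + 1)) + 1 := by omega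
    rw [h3, List.replicate_succ]
    simp
  · rw [if_neg hl]
    have h0 : 3 - s.length = 0 := by omega
    simp [h0]
termination_by 3 - s.length
decreasing_by simp; omega

-- ---- auxiliary structure facts used in the final assembly ----

theorem pvChain_dropWhile (m : List Char) (h : List.IsChain pvR m) :
    List.IsChain pvR (m.dropWhile pvPd) := by
  rw [pvDropWhile_chain _ h]
  split
  · exact h.tail
  · exact h

theorem pvStrip_eq (m : List Char) (h : List.IsChain pvR m) :
    PySem.Chars.stripChars m ['.'] = pvTs (m.dropWhile pvPd) := by
  unfold PySem.Chars.stripChars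
  have hp : (fun c => (['.'] : List Char).contains c) = pvPd := by
    funext c; by_cases hx : c = '.' <;> simp [pvPd, hx]
  rw [hp, pvRstrip_chain _ (pvChain_dropWhile m h)]

-- ===== VERDICT (by name: the statement is the Claim_ definition above) =====
set_option maxHeartbeats 1000000 in
theorem solution_spec : Claim_equal_solution := by
  intro new_id _ hpre
  unfold Pre_solution at hpre
  unfold Spec_solution solution solution_alt
  dsimp only
  -- the lowercased input and its filtered form
  have hxs : (PySem.Str.lower new_id).toList = PySem.Chars.lower new_id.toList :=
    PySem.Str.toList_lower new_id
  set xs := PySem.Chars.lower new_id.toList with hxsdef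
  set f := xs.filter (fun c => pvLetters.contains c) with hfdef
  -- A's step2 is the filter, A's step3 and B's buffer are the one-pass machine output m
  have hlen : PySem.Str.len new_id = (xs.length : Int) := by
    simp [hxsdef, PySem.Chars.lower]
  rw [hlen, pvStep2_eq xs, pvStep3Loop_eq f, hxs, pvFold_go2 xs []]
  rw [show (([] : List Char).getLast? == some '.') = false from rfl, List.nil_append]
  set m := pvGo2 false f with hmdef
  have hmne : m ≠ [] := pvGo2_false_ne_nil f hpre
  have hmchain : List.IsChain pvR m := pvChain_go2_false f
  obtain ⟨c0, hc0⟩ : ∃ c0, m.head? = some c0 := by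
    cases hh : m.head? with
    | none => exact absurd (List.head?_eq_none_iff.mp hh) hmne
    | some c => exact ⟨c, rfl⟩
  rw [pvGet0 m, hc0]
  dsimp only
  -- A's step4 equals B's two-sided strip
  rw [pvStep4_eq m hmchain hmne c0 hc0, pvStrip_eq m hmchain]
  set m2 := pvTs (m.dropWhile pvPd) with hm2def
  set s1 := if m2 = [] then ['a'] else m2 with hs1def
  -- facts about s1
  obtain ⟨ch, hch, hchne⟩ : ∃ ch, s1.head? = some ch ∧ ch ≠ '.' := by
    by_cases hm2 : m2 = []
    · exact ⟨'a', by simp [hs1def, hm2], by decide⟩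
    · have hdwne : m.dropWhile pvPd ≠ [] := by
        intro hx; rw [hm2def, hx] at hm2; exact hm2 rfl
      obtain ⟨cd, hcd⟩ : ∃ cd, (m.dropWhile pvPd).head? = some cd := by
        cases hh : (m.dropWhile pvPd).head? with
        | none => exact absurd (List.head?_eq_none_iff.mp hh) hdwne
        | some c => exact ⟨c, rfl⟩
      have hcdne : cd ≠ '.' := pvHead_dropWhile _ _ hcd
      refine ⟨cd, ?_, hcdne⟩
      rw [hs1def, if_neg hm2, hm2def]
      exact pvTs_head _ _ hcd hcdne
  have hs1chain : List.IsChain pvR s1 := by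
    rw [hs1def]
    split
    · simp
    · exact pvTs_chain _ (pvChain_dropWhile m hmchain)
  have hs1ne : s1 ≠ [] := by
    intro hx; rw [hx] at hch; simp at hch
  -- A's conditional truncation equals B's unconditional take 15
  have h6a : (if 16 ≤ PySem.List.len s1 then PySem.List.slice s1 none (some 15) else s1)
      = s1.take 15 := by
    by_cases hl : 16 ≤ s1.length
    · rw [if_pos (by simp [PySem.List.len]; omega), pvSlice15]
    · rw [if_neg (by simp [PySem.List.len]; omega), List.take_of_length_le (by omega)]
  rw [h6a, pvSlice15]
  set t15 := s1.take 15 with ht15def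
  have ht15chain : List.IsChain pvR t15 := hs1chain.take 15
  have ht15head : t15.head? = some ch := by
    rw [ht15def, List.head?_take]
    simp [hch]
  have ht15ne : t15 ≠ [] := by
    intro hx; rw [hx] at ht15head; simp at ht15head
  obtain ⟨cl, hcl⟩ : ∃ cl, t15.getLast? = some cl := by
    cases hh : t15.getLast? with
    | none => exact absurd (List.getLast?_eq_none_iff.mp hh) ht15ne
    | some c => exact ⟨c, rfl⟩
  -- A's trailing-dot removal equals B's right strip
  have hrstrip : pvRstripDot t15 = pvTs t15 := by
    unfold pvRstripDot
    exact pvRstrip_chain t15 ht15chain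
  rw [pvGetNeg1 t15, hcl]
  dsimp only
  have h6 : (if cl = '.' then PySem.List.slice t15 none (some (-1)) else t15) = pvTs t15 := by
    unfold pvTs
    by_cases hdot : cl = '.'
    · subst hdot
      rw [if_pos rfl, if_pos hcl, pvSliceNeg1]
    · rw [if_neg hdot, if_neg (by rw [hcl]; exact fun hx => hdot (Option.some.inj hx))]
  rw [h6, hrstrip]
  set s2 := pvTs t15 with hs2def
  have hs2head : s2.head? = some ch := pvTs_head _ _ ht15head hchne
  have hs2ne : s2 ≠ [] := by
    intro hx; rw [hx] at hs2head; simp at hs2head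
  obtain ⟨ce, hce⟩ : ∃ ce, s2.getLast? = some ce := by
    cases hh : s2.getLast? with
    | none => exact absurd (List.getLast?_eq_none_iff.mp hh) hs2ne
    | some c => exact ⟨c, rfl⟩
  rw [pvGetNeg1 s2, hce]
  dsimp only
  rw [pvStep7_eq s2 ce hce]
  congr 2
  simp [PySem.List.len]
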